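-- pv_equiv track=rewrite | github.com/ekropotin/advent_of_code_2025_python | day_12/main.py | _place_variant
-- ===== SOURCE A (Python) =====
-- from typing import List, Set, Tuple
--
-- Coord = Tuple[int, int]
--
-- def _place_variant(variant: Set[Coord], width: int, height: int) -> Set[int]:
--     """Generate all valid positions for a shape variant as bitmasks."""
--     placements = set()
--
--     # Find variant bounds
--     max_x = max(x for x, y in variant)
--     max_y = max(y for x, y in variant)
--
--     # Try all positions where the shape fits
--     for offset_y in range(height - max_y):
--         for offset_x in range(width - max_x):
--             # Convert this placement to a bitmask
--             mask = 0
--             for x, y in variant: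
--                 cell_index = (offset_y + y) * width + (offset_x + x)
--                 mask |= 1 << cell_index
--             placements.add(mask)
--
--     return placements
-- ===== SOURCE B (Python) =====
-- def _place_variant(variant, width, height):
--     """Generate all valid positions for a shape variant as bitmasks."""
--     max_x = max(x for x, y in variant)
--     max_y = max(y for x, y in variant)
--     if width <= max_x or height <= max_y:
--         return set()
--     # Base mask of the placement at offset (0, 0), computed once.
--     base = 0
--     for x, y in variant:
--         base |= 1 << (y * width + x)
--     # Stage 1: the first row of placements, shifting the base mask right-wards.
--     row0 = [base << offset_x for offset_x in range(width - max_x)]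
--     # Stage 2: every further row is the first row shifted down by whole rows.
--     rows = [[m << (offset_y * width) for m in row0]
--             for offset_y in range(height - max_y)]
--     return {m for r in rows for m in r}
-- ===== Notes on version B (the rewrite author's own statement) =====
-- stated objective: alternative
-- what changed: B builds the offset-(0,0) bitmask once and derives all placements in stages - a first row of left-shifted copies, then one shifted row list per vertical offset, deduplicated into a set at the end - instead of A's cell-by-cell mask assembly inside each offset of a nested loop.
-- outside the precondition, e.g. on _place_variant({(-3, -5)}, -1, -3): A returns {8, 2, 4}, B raises ValueError
import Mathlib
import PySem

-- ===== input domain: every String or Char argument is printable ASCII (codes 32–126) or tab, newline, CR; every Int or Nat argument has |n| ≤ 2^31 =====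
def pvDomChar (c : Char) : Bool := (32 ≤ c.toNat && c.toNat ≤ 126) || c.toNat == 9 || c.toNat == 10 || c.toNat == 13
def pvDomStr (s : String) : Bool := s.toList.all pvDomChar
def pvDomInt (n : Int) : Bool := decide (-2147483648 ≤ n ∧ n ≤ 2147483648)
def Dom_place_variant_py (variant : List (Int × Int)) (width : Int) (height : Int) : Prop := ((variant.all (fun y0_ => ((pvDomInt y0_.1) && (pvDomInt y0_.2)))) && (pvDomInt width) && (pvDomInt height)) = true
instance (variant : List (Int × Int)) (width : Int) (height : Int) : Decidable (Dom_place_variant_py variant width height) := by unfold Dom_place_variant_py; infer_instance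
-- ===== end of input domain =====

-- B computes the offset-(0,0) bitmask once and builds the placements in stages — a first row
-- of shifted copies, then a list of rows each shifted down by whole rows, deduplicated at the
-- end — instead of A's per-offset cell-by-cell mask assembly (objective: alternative).

-- ===== PORT A =====
-- max(x for x, y in variant): `.getD 0` is only reached on the empty variant, which Pre_ excludes.
-- 1 << c is ported as (1 : Int) <<< c.toNat, exact for 0 ≤ c; Pre_ excludes the negative shift
-- counts on which Python raises ValueError.
def place_variant_py (variant : List (Int × Int)) (width : Int) (height : Int) : List Int :=
  let max_x : Int := (PySem.List.max? (variant.map (fun p => p.1)) (fun x => x)).getD 0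
  let max_y : Int := (PySem.List.max? (variant.map (fun p => p.2)) (fun x => x)).getD 0
  (PySem.List.pyRange 0 (height - max_y) 1).foldl (fun placements offset_y =>
    (PySem.List.pyRange 0 (width - max_x) 1).foldl (fun placements offset_x =>
      let mask : Int := variant.foldl
        (fun m p => PySem.Int.bor m ((1 : Int) <<< ((offset_y + p.2) * width + (offset_x + p.1)).toNat)) 0
      PySem.Set.add placements mask) placements) PySem.Set.empty

-- ===== PORT B =====
def place_variant_py_alt (variant : List (Int × Int)) (width : Int) (height : Int) : List Int :=
  let max_x : Int := (PySem.List.max? (variant.map (fun p => p.1)) (fun x => x)).getD 0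
  let max_y : Int := (PySem.List.max? (variant.map (fun p => p.2)) (fun x => x)).getD 0
  if width ≤ max_x ∨ height ≤ max_y then ([] : List Int)
  else
    let base : Int := variant.foldl
      (fun b p => PySem.Int.bor b ((1 : Int) <<< (p.2 * width + p.1).toNat)) 0
    let row0 : List Int := (PySem.List.pyRange 0 (width - max_x) 1).map
      (fun offset_x => base <<< offset_x.toNat : Int → Int)
    let rows : List (List Int) := (PySem.List.pyRange 0 (height - max_y) 1).map
      (fun offset_y => row0.map (fun m : Int => m <<< (offset_y * width).toNat))
    PySem.Set.ofList rows.flatten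

-- ===== PRECONDITION & SPEC =====
-- Pre_ excludes the inputs on which A raises ValueError (empty variant, or a negative shift
-- count reached by its loops) and the degenerate negative-width/negative-coordinate corners
-- where A's loops happen to stay in range but B's base mask or row shift count would be
-- negative, so B raises ValueError there.
def Pre_place_variant_py (variant : List (Int × Int)) (width : Int) (height : Int) : Prop :=
  variant ≠ [] ∧
    ((∃ p ∈ variant, height ≤ p.2) ∨ (∃ p ∈ variant, width ≤ p.1) ∨
      ((∀ p ∈ variant, 0 ≤ p.2 * width + p.1) ∧
        (0 ≤ width ∨ ∃ p ∈ variant, height ≤ p.2 + 1)))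
instance (variant : List (Int × Int)) (width : Int) (height : Int) : Decidable (Pre_place_variant_py variant width height) := by unfold Pre_place_variant_py; infer_instance

def pvWitness_place_variant_py : (List (Int × Int)) × Int × Int := ([(0, 0), (1, 0), (1, 1)], 3, 4)

def Spec_place_variant_py (variant : List (Int × Int)) (width : Int) (height : Int) (out : List Int) : Prop := out = place_variant_py_alt variant width height
instance (variant : List (Int × Int)) (width : Int) (height : Int) (out : List Int) : Decidable (Spec_place_variant_py variant width height out) := by unfold Spec_place_variant_py; infer_instance

-- ===== CLAIM (what is proved, stated in full; the proofs are below) =====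
def Claim_equal_place_variant_py : Prop := ∀ (variant : List (Int × Int)) (width : Int) (height : Int), Dom_place_variant_py variant width height → Pre_place_variant_py variant width height → Spec_place_variant_py variant width height (place_variant_py variant width height)

-- ===== LEMMAS AND PROOFS =====

-- the fold that ORs the cell bits together commutes with a common left shift
theorem pv_fold_shift (l : List (Int × Int)) (width s : Int) (hs : 0 ≤ s)
    (hidx : ∀ p ∈ l, 0 ≤ p.2 * width + p.1) (acc : Nat) :
    l.foldl (fun m p => PySem.Int.bor m ((1 : Int) <<< (p.2 * width + p.1 + s).toNat))
        ((acc : Int) <<< s.toNat)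
      = (l.foldl (fun b p => PySem.Int.bor b ((1 : Int) <<< (p.2 * width + p.1).toNat)) (acc : Int))
          <<< s.toNat := by
  induction l generalizing acc with
  | nil => rfl
  | cons q t ih =>
    have hq : 0 ≤ q.2 * width + q.1 := hidx q (List.mem_cons_self ..)
    have ht : ∀ p ∈ t, 0 ≤ p.2 * width + p.1 := fun p hp => hidx p (List.mem_cons_of_mem _ hp)
    simp only [List.foldl_cons]
    have h1 : PySem.Int.bor ((acc : Int) <<< s.toNat)
        ((1 : Int) <<< (q.2 * width + q.1 + s).toNat)
        = (((acc ||| (1 <<< (q.2 * width + q.1).toNat) : Nat) : Int)) <<< s.toNat := by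
      have hsum : (q.2 * width + q.1 + s).toNat = (q.2 * width + q.1).toNat + s.toNat := by omega
      have c1 : ((acc : Int) <<< s.toNat) = ((acc <<< s.toNat : Nat) : Int) := by
        exact_mod_cast rfl
      have c2 : ((1 : Int) <<< (q.2 * width + q.1 + s).toNat)
          = (((1 <<< ((q.2 * width + q.1).toNat + s.toNat) : Nat)) : Int) := by
        rw [hsum]; exact_mod_cast rfl
      rw [c1, c2, PySem.Int.bor_natCast]
      have hn : (acc <<< s.toNat ||| 1 <<< ((q.2 * width + q.1).toNat + s.toNat))
          = (acc ||| 1 <<< (q.2 * width + q.1).toNat) <<< s.toNat := by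
        rw [Nat.shiftLeft_or_distrib, Nat.shiftLeft_add]
      rw [hn]; exact_mod_cast rfl
    have h2 : PySem.Int.bor (acc : Int) ((1 : Int) <<< (q.2 * width + q.1).toNat)
        = ((acc ||| (1 <<< (q.2 * width + q.1).toNat) : Nat) : Int) := by
      have c2 : ((1 : Int) <<< (q.2 * width + q.1).toNat)
          = (((1 <<< (q.2 * width + q.1).toNat : Nat)) : Int) := by exact_mod_cast rfl
      rw [c2, PySem.Int.bor_natCast]
    rw [h1, h2, ih ht]

-- max(xs) via max?: every element is bounded by the `.getD 0` value when xs ≠ []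
theorem pv_getD_isMax (xs : List Int) (hne : xs ≠ []) (y : Int) (hy : y ∈ xs) :
    y ≤ (PySem.List.max? xs (fun x => x)).getD 0 := by
  cases h : PySem.List.max? xs (fun x => x) with
  | none => exact absurd ((PySem.List.max?_eq_none_iff xs _).1 h) hne
  | some m => simpa using PySem.List.max?_isMax h y hy

-- two stacked nonnegative shifts are one shift by the sum
theorem pv_shift_shift (b s t : Int) (hs : 0 ≤ s) (ht : 0 ≤ t) :
    (b <<< s.toNat) <<< t.toNat = b <<< (t + s).toNat := by
  have h : (t + s).toNat = s.toNat + t.toNat := by omega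
  rw [h, Int.shiftLeft_eq, Int.shiftLeft_eq, Int.shiftLeft_eq, pow_add]
  ring

-- ===== VERDICT (by name: the statement is the Claim_ definition above) =====
theorem place_variant_py_spec : Claim_equal_place_variant_py := by
  intro variant width height _ hpre
  obtain ⟨hne, hbr⟩ := hpre
  unfold Spec_place_variant_py
  simp only [place_variant_py, place_variant_py_alt]
  set mx := (PySem.List.max? (variant.map (fun p => p.1)) (fun x => x)).getD 0 with hmx
  set my := (PySem.List.max? (variant.map (fun p => p.2)) (fun x => x)).getD 0 with hmy
  have hmapx : variant.map (fun p => p.1) ≠ [] := by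
    simpa [List.map_eq_nil_iff] using hne
  have hmapy : variant.map (fun p => p.2) ≠ [] := by
    simpa [List.map_eq_nil_iff] using hne
  have hxmax : ∀ p ∈ variant, p.1 ≤ mx := fun p hp =>
    pv_getD_isMax _ hmapx _ (List.mem_map_of_mem hp)
  have hymax : ∀ p ∈ variant, p.2 ≤ my := fun p hp =>
    pv_getD_isMax _ hmapy _ (List.mem_map_of_mem hp)
  by_cases hif : width ≤ mx ∨ height ≤ my
  · rw [if_pos hif]
    rcases hif with hw | hh
    · rw [PySem.List.pyRange_one_eq_nil (by omega : width - mx ≤ 0)]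
      simp only [List.foldl_nil]
      exact List.foldl_fixed _
    · rw [PySem.List.pyRange_one_eq_nil (by omega : height - my ≤ 0)]
      rfl
  · rw [if_neg hif]
    push Not at hif
    obtain ⟨hwx, hhy⟩ := hif
    have hbr3 : (∀ p ∈ variant, 0 ≤ p.2 * width + p.1) ∧
        (0 ≤ width ∨ ∃ p ∈ variant, height ≤ p.2 + 1) := by
      rcases hbr with ⟨p, hp, h⟩ | ⟨p, hp, h⟩ | h
      · exact absurd h (by have := hymax p hp; omega)
      · exact absurd h (by have := hxmax p hp; omega)
      · exact h
    obtain ⟨hidx, hcase⟩ := hbr3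
    -- reshape B's staged ofList-of-flatten into the nested fold shape
    rw [PySem.Set.ofList_eq_foldl, List.foldl_flatten, List.foldl_map]
    refine PySem.List.foldl_congr_mem _ _ _ _ ?_
    intro acc oy hoy
    rw [List.foldl_map, List.foldl_map]
    refine PySem.List.foldl_congr_mem _ _ _ _ ?_
    intro acc2 ox hox
    have hoy' := (PySem.List.mem_pyRange_one).1 hoy
    have hox' := (PySem.List.mem_pyRange_one).1 hox
    have hyw : 0 ≤ oy * width := by
      rcases hcase with hw | ⟨p, hp, h⟩
      · exact mul_nonneg hoy'.1 hw
      · have hpm := hymax p hp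
        have h0 : oy = 0 := by omega
        rw [h0, zero_mul]
    have hs : 0 ≤ oy * width + ox := by have := hox'.1; omega
    congr 1
    have hfun : (fun (m : Int) (p : Int × Int) =>
          PySem.Int.bor m ((1 : Int) <<< ((oy + p.2) * width + (ox + p.1)).toNat))
        = (fun (m : Int) (p : Int × Int) =>
          PySem.Int.bor m ((1 : Int) <<< (p.2 * width + p.1 + (oy * width + ox)).toNat)) := by
      funext m p
      congr 3
      ring
    rw [hfun]
    have hmain := pv_fold_shift variant width (oy * width + ox) hs hidx 0
    rw [pv_shift_shift _ _ _ hox'.1 hyw]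
    simpa using hmain
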